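-- pv_equiv track=rewrite | github.com/bloodxsr/Xena | bot/utils/totp_auth.py | strip_totp_flag
-- ===== SOURCE A (Python) =====
-- TOTP_FLAG = "--totp"
--
-- def strip_totp_flag(text: str) -> str:
--     pieces = text.split()
--     if not pieces:
--         return text
--
--     cleaned: list[str] = []
--     index = 0
--     while index < len(pieces):
--         token = pieces[index]
--         if token.lower() == TOTP_FLAG and index + 1 < len(pieces):
--             next_token = pieces[index + 1]
--             if next_token.isdigit() and len(next_token) == 6:
--                 index += 2
--                 continue
--         cleaned.append(token)
--         index += 1
--
--     return " ".join(cleaned).strip()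
-- ===== SOURCE B (Python) =====
-- TOTP_FLAG = "--totp"
--
-- def strip_totp_flag(text: str) -> str:
--     pieces = text.split()
--     if not pieces:
--         return text
--
--     drop = set()
--     for i in range(len(pieces) - 1):
--         if pieces[i].lower() == TOTP_FLAG and pieces[i + 1].isdigit() and len(pieces[i + 1]) == 6:
--             drop.add(i)
--             drop.add(i + 1)
--
--     return " ".join(p for i, p in enumerate(pieces) if i not in drop).strip()
-- ===== Notes on version B (the rewrite author's own statement) =====
-- stated objective: alternative
-- what changed: A's single greedy while loop that jumps the index by 2 past each matched flag/6-digit-code pair is replaced by two passes: one pass precomputes the set of dropped indices, a second pass filters the tokens by enumerate; correct because matched pairs never overlap (the consumed token is a digit string, never the flag).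
import Mathlib
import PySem

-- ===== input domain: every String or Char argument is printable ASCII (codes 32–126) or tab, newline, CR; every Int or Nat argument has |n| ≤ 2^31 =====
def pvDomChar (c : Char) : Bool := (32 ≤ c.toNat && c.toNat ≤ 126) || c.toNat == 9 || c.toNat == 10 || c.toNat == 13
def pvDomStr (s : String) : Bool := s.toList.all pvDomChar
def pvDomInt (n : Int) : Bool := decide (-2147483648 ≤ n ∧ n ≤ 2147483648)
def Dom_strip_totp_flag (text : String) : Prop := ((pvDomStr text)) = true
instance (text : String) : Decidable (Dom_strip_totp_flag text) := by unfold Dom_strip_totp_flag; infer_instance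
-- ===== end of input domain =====

-- B replaces A's greedy index-jumping while loop by two passes (precompute the set of
-- dropped indices, then filter by enumerate); same return value, alternative decomposition.

-- ===== PORT A =====
-- the while loop of A: `index` advances by 2 when a "--totp <6 digits>" pair is consumed,
-- else the token is kept and `index` advances by 1 (cleaned-accumulator appends become conses)
-- (the Python locals `token` = pieces[index] and `next_token` = pieces[index+1] are inlined)
def stripLoopA (pieces : List String) (index : Nat) : List String :=
  if _h : index < pieces.length then
    if (PySem.Str.lower (pieces.getD index "") == "--totp")
        && decide (index + 1 < pieces.length) then
      if PySem.Str.strIsdigit (pieces.getD (index + 1) "")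
          && (PySem.Str.len (pieces.getD (index + 1) "") == 6) then
        stripLoopA pieces (index + 2)
      else
        pieces.getD index "" :: stripLoopA pieces (index + 1)
    else
      pieces.getD index "" :: stripLoopA pieces (index + 1)
  else []
termination_by pieces.length - index

def strip_totp_flag (text : String) : String :=
  let pieces := PySem.Str.split₀ text
  if pieces.isEmpty then text
  else PySem.Str.strip (PySem.Str.join " " (stripLoopA pieces 0))

-- ===== PORT B =====
def strip_totp_flag_alt (text : String) : String :=
  let pieces := PySem.Str.split₀ text
  if pieces.isEmpty then text
  else
    let drop := (PySem.List.pyRange 0 ((pieces.length : Int) - 1) 1).foldl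
      (fun s i =>
        if (PySem.Str.lower (PySem.List.pyGetD pieces i "") == "--totp")
            && PySem.Str.strIsdigit (PySem.List.pyGetD pieces (i + 1) "")
            && (PySem.Str.len (PySem.List.pyGetD pieces (i + 1) "") == 6) then
          (s.add i).add (i + 1)
        else s)
      (PySem.Set.ofList ([] : List Int))
    PySem.Str.strip (PySem.Str.join " "
      (((PySem.List.enumerate pieces).filter (fun p => !(drop.contains p.1))).map (·.2)))

-- ===== PRECONDITION & SPEC =====
def Spec_strip_totp_flag (text : String) (out : String) : Prop := out = strip_totp_flag_alt text
instance (text : String) (out : String) : Decidable (Spec_strip_totp_flag text out) := by unfold Spec_strip_totp_flag; infer_instance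

-- ===== CLAIM (what is proved, stated in full; the proofs are below) =====
def Claim_equal_strip_totp_flag : Prop := ∀ (text : String), Dom_strip_totp_flag text → Spec_strip_totp_flag text (strip_totp_flag text)

-- ===== LEMMAS AND PROOFS =====

-- the pair-match test at absolute index j (bound check included)
def pvMcb (l : List String) (j : Nat) : Bool :=
  decide (j + 1 < l.length)
    && ((PySem.Str.lower (l.getD j "") == "--totp")
        && PySem.Str.strIsdigit (l.getD (j + 1) "")
        && (PySem.Str.len (l.getD (j + 1) "") == 6))

-- index j survives iff it is neither the flag of a match nor the consumed code of a match
def pvKeep (l : List String) (j : Nat) : Bool :=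
  !(pvMcb l j || (decide (0 < j) && pvMcb l (j - 1)))

-- a string made of digits is never (case-insensitively) "--totp"
lemma pvDigitNotFlag (u : String) (h : PySem.Str.strIsdigit u = true) :
    (PySem.Str.lower u == "--totp") = false := by
  rw [Bool.eq_false_iff]
  intro hbeq
  have heq : PySem.Str.lower u = "--totp" := eq_of_beq hbeq
  have hl : PySem.Chars.lower u.toList = "--totp".toList := by
    rw [← PySem.Str.toList_lower, heq]
  have hd : PySem.Chars.strIsdigit u.toList = true := by
    rw [← PySem.Str.strIsdigit_eq]; exact h
  rcases hcs : u.toList with _ | ⟨c, cs⟩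
  · rw [hcs] at hl; simp [PySem.Chars.lower] at hl
  · rw [hcs] at hl hd
    simp only [PySem.Chars.strIsdigit, List.all_cons, Bool.and_eq_true] at hd
    have hc : PySem.Chars.isdigit c = true := hd.2.1
    have h9 : c ≤ '9' := by
      simp only [PySem.Chars.isdigit, Bool.and_eq_true, decide_eq_true_eq] at hc
      exact hc.2
    have hnup : PySem.Chars.isupper c = false := by
      simp only [PySem.Chars.isupper]
      have : ¬ ('A' ≤ c) := fun hA => absurd (le_trans hA h9) (by decide)
      simp [this]
    have hfix : PySem.Chars.lowerChar c = c := by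
      simp [PySem.Chars.lowerChar, hnup]
    simp only [PySem.Chars.lower, List.map_cons] at hl
    have : c = '-' := by
      have := (List.cons.injEq _ _ _ _).mp hl
      rw [← hfix]; exact this.1
    rw [this] at hc
    exact absurd hc (by decide)

-- A's loop keeps the token iff the local pair test fails
lemma pvStepKeep (l : List String) (i : Nat) (hi : i < l.length) (hm : pvMcb l i = false) :
    stripLoopA l i = l.getD i "" :: stripLoopA l (i + 1) := by
  rw [stripLoopA, dif_pos hi]
  by_cases h1 : (PySem.Str.lower (l.getD i "") == "--totp") = true
  · by_cases h2 : i + 1 < l.length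
    · rw [if_pos (show ((PySem.Str.lower (l.getD i "") == "--totp")
          && decide (i + 1 < l.length)) = true by rw [h1, decide_eq_true h2]; rfl)]
      simp only [pvMcb, decide_eq_true h2, Bool.true_and, h1] at hm
      rw [if_neg (by rw [hm]; exact Bool.false_ne_true)]
    · rw [if_neg (by rw [decide_eq_false h2]; simp)]
  · rw [Bool.not_eq_true] at h1
    rw [if_neg (by rw [h1]; simp)]

-- A's loop consumes the pair iff the local pair test succeeds
lemma pvStepSkip (l : List String) (i : Nat) (hm : pvMcb l i = true) :
    stripLoopA l i = stripLoopA l (i + 2) := by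
  unfold pvMcb at hm
  rw [Bool.and_eq_true, Bool.and_eq_true, Bool.and_eq_true] at hm
  obtain ⟨hb, ⟨hX, hY⟩, hZ⟩ := hm
  have h2 : i + 1 < l.length := of_decide_eq_true hb
  rw [stripLoopA, dif_pos (by omega)]
  rw [if_pos (show ((PySem.Str.lower (l.getD i "") == "--totp")
        && decide (i + 1 < l.length)) = true by rw [hX, decide_eq_true h2]; rfl)]
  rw [if_pos (show (PySem.Str.strIsdigit (l.getD (i + 1) "")
        && (PySem.Str.len (l.getD (i + 1) "") == 6)) = true by rw [hY, hZ]; rfl)]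

-- characterization of A's loop from any reachable state
lemma pvLoopA_eq (k : Nat) : ∀ (l : List String) (i : Nat), l.length - i ≤ k →
    (i = 0 ∨ pvMcb l (i - 1) = false) →
    stripLoopA l i
      = ((List.range' i (l.length - i)).filter (pvKeep l)).map (fun j => l.getD j "") := by
  induction k with
  | zero =>
    intro l i hk _
    have hge : ¬ i < l.length := by omega
    rw [stripLoopA, dif_neg hge, Nat.sub_eq_zero_of_le (by omega)]
    simp
  | succ k ih =>
    intro l i hk hreach
    by_cases hi : i < l.length
    · by_cases hm : pvMcb l i = true
      · have hm' := hm
        unfold pvMcb at hm'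
        rw [Bool.and_eq_true, Bool.and_eq_true, Bool.and_eq_true] at hm'
        obtain ⟨hb, ⟨hX, hY⟩, hZ⟩ := hm'
        have h2 : i + 1 < l.length := of_decide_eq_true hb
        have hm1 : pvMcb l (i + 1) = false := by
          unfold pvMcb
          rw [pvDigitNotFlag _ hY]
          simp
        have hsplit : l.length - i = (l.length - (i + 2)) + 1 + 1 := by omega
        rw [pvStepSkip l i hm, hsplit, List.range'_succ, List.range'_succ]
        rw [List.filter_cons_of_neg (by simp [pvKeep, hm]),
            List.filter_cons_of_neg (by simp [pvKeep, hm])]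
        rw [ih l (i + 2) (by omega) (Or.inr (by simpa using hm1))]
      · rw [Bool.not_eq_true] at hm
        have hm' : pvMcb l i = false := hm
        have hkeep : pvKeep l i = true := by
          rcases hreach with rfl | hr
          · simp [pvKeep, hm']
          · simp [pvKeep, hm', hr]
        have hsplit : l.length - i = (l.length - (i + 1)) + 1 := by omega
        rw [pvStepKeep l i hi hm', hsplit, List.range'_succ,
            List.filter_cons_of_pos hkeep, List.map_cons]
        rw [ih l (i + 1) (by omega) (Or.inr (by simpa using hm'))]
    · rw [stripLoopA, dif_neg hi, Nat.sub_eq_zero_of_le (by omega)]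
      simp

-- membership in the fold that builds B's drop set
lemma pvMemFold (c : Int → Bool) : ∀ (rng : List Int) (s : PySem.Set Int) (j : Int),
    (j ∈ rng.foldl (fun s i => if c i then (s.add i).add (i + 1) else s) s)
      ↔ (j ∈ s ∨ ∃ i ∈ rng, c i = true ∧ (j = i ∨ j = i + 1)) := by
  intro rng
  induction rng with
  | nil => simp
  | cons x xs ih =>
    intro s j
    simp only [List.foldl_cons, ih, List.mem_cons]
    by_cases hc : c x = true
    · simp only [if_pos hc, PySem.Set.mem_add]
      constructor
      · rintro (((h|h)|h)|⟨i,hi,hci,hj⟩)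
        · exact Or.inl h
        · exact Or.inr ⟨x, Or.inl rfl, hc, Or.inl h⟩
        · exact Or.inr ⟨x, Or.inl rfl, hc, Or.inr h⟩
        · exact Or.inr ⟨i, Or.inr hi, hci, hj⟩
      · rintro (h|⟨i,(rfl|hi),hci,hj⟩)
        · exact Or.inl (Or.inl (Or.inl h))
        · rcases hj with rfl|rfl
          · exact Or.inl (Or.inl (Or.inr rfl))
          · exact Or.inl (Or.inr rfl)
        · exact Or.inr ⟨i, hi, hci, hj⟩
    · simp only [Bool.not_eq_true] at hc
      simp only [hc, Bool.false_eq_true, if_false]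
      constructor
      · rintro (h|⟨i,hi,hci,hj⟩)
        · exact Or.inl h
        · exact Or.inr ⟨i, Or.inr hi, hci, hj⟩
      · rintro (h|⟨i,(rfl|hi),hci,hj⟩)
        · exact Or.inl h
        · rw [hc] at hci; exact absurd hci (by simp)
        · exact Or.inr ⟨i, hi, hci, hj⟩

-- B's enumerate-filter-map as a range'-filter-map over the full list
lemma pvEnumFilter (Q : Int × String → Bool) : ∀ (l full : List String) (s : Nat),
    l = full.drop s →
    ((PySem.List.enumerate l (↑s : Int)).filter Q).map (·.2)
      = ((List.range' s (full.length - s)).filter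
          (fun (j : Nat) => Q ((↑j : Int), full.getD j ""))).map (fun j => full.getD j "") := by
  intro l
  induction l with
  | nil =>
    intro full s h
    have hle : full.length ≤ s := by
      by_contra hlt
      push Not at hlt
      have := congrArg List.length h
      simp [List.length_drop] at this
      omega
    simp [PySem.List.enumerate, Nat.sub_eq_zero_of_le hle]
  | cons x xs ih =>
    intro full s h
    have hs : s < full.length := by
      by_contra hge
      push Not at hge
      rw [List.drop_eq_nil_of_le hge] at h
      simp at h
    have h0 : full[s]? = some x := by
      have h1 : (full.drop s)[0]? = some x := by rw [← h]; rfl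
      rwa [List.getElem?_drop, Nat.add_zero] at h1
    have hxs : xs = full.drop (s + 1) := by
      have h2 : (full.drop s).drop 1 = full.drop (s + 1) := by
        rw [List.drop_drop, Nat.add_comm]
      rw [← h2, ← h, List.drop_one, List.tail_cons]
    have hrange : List.range' s (full.length - s) = s :: List.range' (s+1) (full.length - (s+1)) := by
      have h1 : full.length - s = (full.length - (s+1)) + 1 := by omega
      rw [h1, List.range'_succ]
    have hcast : (↑s : Int) + 1 = ((s+1 : Nat) : Int) := by push_cast; ring
    rw [PySem.List.enumerate_cons, hrange]
    by_cases hq : Q ((↑s : Int), x) = true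
    · rw [List.filter_cons_of_pos hq,
          List.filter_cons_of_pos (by simpa [List.getD_eq_getElem?_getD, h0] using hq)]
      rw [List.map_cons, List.map_cons, hcast, ih full (s+1) hxs]
      congr 1
      simp [List.getD, h0]
    · rw [Bool.not_eq_true] at hq
      rw [List.filter_cons_of_neg (by simp [hq]),
          List.filter_cons_of_neg (by simp [List.getD_eq_getElem?_getD, h0, hq])]
      rw [hcast, ih full (s+1) hxs]

-- the big boolean condition of B's fold at a cast Nat index, in getD form
lemma pvCond_cast (l : List String) (m : Nat) :
    ((PySem.Str.lower (PySem.List.pyGetD l (↑m) "") == "--totp")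
      && PySem.Str.strIsdigit (PySem.List.pyGetD l ((↑m : Int) + 1) "")
      && (PySem.Str.len (PySem.List.pyGetD l ((↑m : Int) + 1) "") == 6))
    = ((PySem.Str.lower (l.getD m "") == "--totp")
      && PySem.Str.strIsdigit (l.getD (m + 1) "")
      && (PySem.Str.len (l.getD (m + 1) "") == 6)) := by
  have hc : ((m : Int) + 1) = ((m + 1 : Nat) : Int) := by push_cast; ring
  rw [hc, PySem.List.pyGetD_natCast, PySem.List.pyGetD_natCast]

-- B's drop-set test agrees pointwise with pvMcb on in-range indices
lemma pvContains_eq (l : List String) (j : Nat) (hj : j < l.length) :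
    ((PySem.List.pyRange 0 ((l.length : Int) - 1) 1).foldl
      (fun s i =>
        if (PySem.Str.lower (PySem.List.pyGetD l i "") == "--totp")
            && PySem.Str.strIsdigit (PySem.List.pyGetD l (i + 1) "")
            && (PySem.Str.len (PySem.List.pyGetD l (i + 1) "") == 6) then
          (s.add i).add (i + 1)
        else s)
      (PySem.Set.ofList ([] : List Int))).contains (↑j : Int)
      = (pvMcb l j || (decide (0 < j) && pvMcb l (j - 1))) := by
  apply Bool.coe_iff_coe.mp
  rw [PySem.Set.contains_iff, pvMemFold]
  simp only [PySem.Set.mem_ofList, List.not_mem_nil, false_or]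
  constructor
  · rintro ⟨i, hi, hci, hji⟩
    rw [PySem.List.mem_pyRange_one] at hi
    obtain ⟨h0i, hilt⟩ := hi
    set m := i.toNat with hm
    have him : i = (↑m : Int) := (Int.toNat_of_nonneg h0i).symm
    have hmb : m + 1 < l.length := by omega
    rw [him, pvCond_cast] at hci
    rcases hji with hji | hji
    · have : j = m := by omega
      subst this
      simp only [pvMcb, Bool.or_eq_true, Bool.and_eq_true, decide_eq_true_eq]
      exact Or.inl ⟨hmb, by simpa using hci⟩
    · have : j = m + 1 := by omega
      subst this
      simp only [pvMcb, Bool.or_eq_true, Bool.and_eq_true, decide_eq_true_eq,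
        Nat.add_sub_cancel]
      exact Or.inr ⟨by omega, hmb, by simpa using hci⟩
  · intro h
    simp only [pvMcb, Bool.or_eq_true, Bool.and_eq_true, decide_eq_true_eq] at h
    rcases h with ⟨hb, hc⟩ | ⟨hpos, hb, hc⟩
    · refine ⟨(↑j : Int), ?_, ?_, Or.inl rfl⟩
      · rw [PySem.List.mem_pyRange_one]; omega
      · rw [pvCond_cast]; simpa using hc
    · refine ⟨(↑(j - 1) : Int), ?_, ?_, Or.inr (by omega)⟩
      · rw [PySem.List.mem_pyRange_one]
        have : j - 1 + 1 = j := by omega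
        omega
      · rw [pvCond_cast]; simpa using hc

-- ===== VERDICT (by name: the statement is the Claim_ definition above) =====
theorem strip_totp_flag_spec : Claim_equal_strip_totp_flag := by
  intro text _
  unfold Spec_strip_totp_flag strip_totp_flag strip_totp_flag_alt
  set pieces := PySem.Str.split₀ text with hp
  by_cases he : pieces.isEmpty
  · rw [if_pos he, if_pos he]
  · rw [if_neg he, if_neg he]
    apply congrArg
    apply congrArg
    rw [pvLoopA_eq pieces.length pieces 0 (by omega) (Or.inl rfl)]
    rw [show PySem.List.enumerate pieces = PySem.List.enumerate pieces ((0 : Nat) : Int) from rfl]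
    rw [pvEnumFilter _ pieces pieces 0 (by simp)]
    apply congrArg
    apply List.filter_congr
    intro x hx
    have hxlt : x < pieces.length := by
      have := List.mem_range'_1.mp hx
      omega
    simp only []
    rw [pvContains_eq pieces x hxlt]
    simp [pvKeep]
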